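-- pv_equiv track=rewrite | github.com/AboveAverageUsername/opj_project | tensorization scripts/a.py | separatorID
-- ===== SOURCE A (Python) =====
-- import math
--
-- def separatorID(input_ids):
--     returnArr = []
--
--     size = len(input_ids)
--     lastBlockLen = size % 510
--     if(lastBlockLen == 0):
--         lastBlockLen = 510
--
--     blocks = math.ceil(size/510)
--
--     slide = 0
--     for block in range(1, blocks + 1):
--         tmpArr = []
--
--         if(block < blocks):
--
--
--             tmpArr = [101] + input_ids[slide:(slide+510)] + [102]
--             slide += 510
--             returnArr.append(tmpArr)
--
--
--         else:
--             tmpArr = [101] + input_ids[slide:-1] + [input_ids[-1]] + ([0] * (510 - lastBlockLen)) + [102]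
--             returnArr.append(tmpArr)
--
--
--     return returnArr
-- ===== SOURCE B (Python) =====
-- def separatorID(input_ids):
--     pad = (-len(input_ids)) % 510
--     padded = input_ids + [0] * pad
--     return [[101] + padded[i:i+510] + [102] for i in range(0, len(padded), 510)]
-- ===== Notes on version B (the rewrite author's own statement) =====
-- stated objective: simpler
-- what changed: A counts blocks with ceil, tracks a slide pointer and builds the final block through a special branch that reassembles the tail and appends zero padding; B instead pads the input once with zeros to a multiple of 510 and emits every 510-slice identically, with no last-block special case.
import Mathlib
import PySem

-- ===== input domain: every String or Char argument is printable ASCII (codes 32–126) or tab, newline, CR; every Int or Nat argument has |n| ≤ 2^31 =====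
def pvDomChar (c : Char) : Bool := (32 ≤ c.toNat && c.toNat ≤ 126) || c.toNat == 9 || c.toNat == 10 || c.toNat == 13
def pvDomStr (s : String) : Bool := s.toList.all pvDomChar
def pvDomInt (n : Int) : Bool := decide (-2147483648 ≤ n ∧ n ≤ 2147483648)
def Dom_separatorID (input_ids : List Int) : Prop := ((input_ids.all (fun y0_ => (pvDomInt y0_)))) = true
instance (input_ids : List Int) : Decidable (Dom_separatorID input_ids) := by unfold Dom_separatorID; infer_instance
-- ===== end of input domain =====

-- B removes A's last-block special case: pad the input to a multiple of 510 once, then emit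
-- every 510-block identically (objective: simpler); equivalence proved for all inputs.


-- ===== PORT A =====
-- body of A's `for block in range(1, blocks + 1)` loop; state s = (slide, returnArr)
def sepBodyA (input_ids : List Int) (blocks lastBlockLen : Int) (s : Int × List (List Int)) (block : Int) : Int × List (List Int) :=
  if block < blocks then
    (s.1 + 510, s.2 ++ [[101] ++ PySem.List.slice input_ids (some s.1) (some (s.1 + 510)) ++ [102]])
  else
    -- input_ids[-1]: this branch only runs when blocks ≥ 1, i.e. input_ids ≠ [], so the default of pyGetD is never used
    (s.1, s.2 ++ [[101] ++ PySem.List.slice input_ids (some s.1) (some (-1)) ++ [PySem.List.pyGetD input_ids (-1) 0]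
                    ++ List.replicate (510 - lastBlockLen).toNat 0 ++ [102]])

def separatorID (input_ids : List Int) : List (List Int) :=
  let size : Int := PySem.List.len input_ids
  let lastBlockLen0 := PySem.Int.mod size 510
  let lastBlockLen := if lastBlockLen0 = 0 then 510 else lastBlockLen0
  -- math.ceil(size/510) ported as -((-size) // 510): exact, since size is an integer with |size| < 2^53
  let blocks : Int := -(PySem.Int.floordiv (-size) 510)
  ((PySem.List.pyRange 1 (blocks + 1) 1).foldl (sepBodyA input_ids blocks lastBlockLen) (0, [])).2

-- ===== PORT B =====
def separatorID_alt (input_ids : List Int) : List (List Int) :=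
  let pad := PySem.Int.mod (-(PySem.List.len input_ids)) 510
  let padded := input_ids ++ List.replicate pad.toNat 0
  (PySem.List.pyRange 0 (PySem.List.len padded) 510).map
    (fun i => [101] ++ PySem.List.slice padded (some i) (some (i + 510)) ++ [102])

-- ===== PRECONDITION & SPEC =====
def Spec_separatorID (input_ids : List Int) (out : List (List Int)) : Prop := out = separatorID_alt input_ids
instance (input_ids : List Int) (out : List (List Int)) : Decidable (Spec_separatorID input_ids out) := by unfold Spec_separatorID; infer_instance

-- ===== CLAIM (what is proved, stated in full; the proofs are below) =====
def Claim_equal_separatorID : Prop := ∀ (input_ids : List Int), Dom_separatorID input_ids → Spec_separatorID input_ids (separatorID input_ids)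

-- ===== LEMMAS AND PROOFS =====

-- number of blocks, as a Nat: ceil(n / 510)
def nBlocks (n : Nat) : Nat := (n + 509) / 510

-- the input padded with zeros to length 510 * nBlocks
def paddedOf (ids : List Int) : List Int := ids ++ List.replicate (510 * nBlocks ids.length - ids.length) 0

-- the k-th block both programs produce
def blkOf (ids : List Int) (k : Nat) : List Int := [101] ++ ((paddedOf ids).drop (510 * k)).take 510 ++ [102]

-- the value A's loop body appends at (0-based) iteration k
def fBlkA (ids : List Int) (blocks lbl : Int) (k : Nat) : List Int :=
  if (k : Int) + 1 < blocks then
    [101] ++ PySem.List.slice ids (some (510 * (k : Int))) (some (510 * (k : Int) + 510)) ++ [102]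
  else
    [101] ++ PySem.List.slice ids (some (510 * (k : Int))) (some (-1)) ++ [PySem.List.pyGetD ids (-1) 0]
        ++ List.replicate (510 - lbl).toNat 0 ++ [102]

lemma ceil_eq (n : Nat) : -(PySem.Int.floordiv (-(n : Int)) 510) = (nBlocks n : Int) := by
  rw [PySem.Int.floordiv_eq_ediv_of_pos (by norm_num)]
  unfold nBlocks
  omega

lemma loopA_run (ids : List Int) (m : Nat) (lbl : Int) :
    ∀ (f j : Nat) (acc : List (List Int)), j + f = m →
      ((PySem.List.pyRange ((j : Int) + 1) ((m : Int) + 1) 1).foldl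
        (sepBodyA ids (m : Int) lbl) (510 * (j : Int), acc)).2
      = acc ++ (List.range' j f).map (fBlkA ids (m : Int) lbl) := by
  intro f
  induction f with
  | zero =>
    intro j acc hj
    rw [PySem.List.pyRange_one_eq_nil (by omega)]
    simp
  | succ f ih =>
    intro j acc hj
    rw [PySem.List.pyRange_one_cons (by omega), List.foldl_cons]
    by_cases h : (j : Int) + 1 < (m : Int)
    · have hb : sepBodyA ids (m : Int) lbl (510 * (j : Int), acc) ((j : Int) + 1)
          = (510 * ((j : Int) + 1), acc ++ [fBlkA ids (m : Int) lbl j]) := by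
        simp [sepBodyA, fBlkA, h]
        ring
      rw [hb]
      have : ((j : Int) + 1) + 1 = ((j + 1 : Nat) : Int) + 1 := by push_cast; ring
      rw [this]
      have : (510 : Int) * ((j : Int) + 1) = 510 * ((j + 1 : Nat) : Int) := by push_cast; ring
      rw [this, ih (j + 1) _ (by omega)]
      rw [List.range'_succ]
      simp
    · -- last iteration: j + 1 = m, so f = 0 and the remaining range is empty
      have hj1 : j + 1 = m := by omega
      have hf : f = 0 := by omega
      subst hf
      have hb : sepBodyA ids (m : Int) lbl (510 * (j : Int), acc) ((j : Int) + 1)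
          = (510 * (j : Int), acc ++ [fBlkA ids (m : Int) lbl j]) := by
        simp [sepBodyA, fBlkA, h]
      rw [hb, PySem.List.pyRange_one_eq_nil (by omega)]
      simp [List.range'_succ]

-- A as a map over block indices
lemma A_eq_map (ids : List Int) :
    separatorID ids
      = (List.range (nBlocks ids.length)).map
          (fBlkA ids (nBlocks ids.length : Int)
            (if PySem.Int.mod (PySem.List.len ids) 510 = 0 then 510 else PySem.Int.mod (PySem.List.len ids) 510)) := by
  unfold separatorID
  simp only [PySem.List.len_eq]
  rw [show -(PySem.Int.floordiv (-(ids.length : Int)) 510) = (nBlocks ids.length : Int) from ceil_eq _]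
  have h := loopA_run ids (nBlocks ids.length)
    (if PySem.Int.mod (ids.length : Int) 510 = 0 then 510 else PySem.Int.mod (ids.length : Int) 510)
    (nBlocks ids.length) 0 [] (by omega)
  simp only [Nat.cast_zero, mul_zero, zero_add] at h
  rw [h]
  simp [List.range_eq_range']

lemma pad_toNat (n : Nat) : (PySem.Int.mod (-(n : Int)) 510).toNat = 510 * nBlocks n - n := by
  rw [PySem.Int.mod_eq_emod_of_pos (by norm_num)]
  unfold nBlocks
  omega

lemma length_paddedOf (ids : List Int) : (paddedOf ids).length = 510 * nBlocks ids.length := by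
  unfold paddedOf nBlocks
  simp
  omega

-- B as a map over block indices
lemma B_eq_map (ids : List Int) :
    separatorID_alt ids = (List.range (nBlocks ids.length)).map (blkOf ids) := by
  unfold separatorID_alt
  simp only [PySem.List.len_eq, pad_toNat]
  rw [show (ids ++ List.replicate (510 * nBlocks ids.length - ids.length) 0) = paddedOf ids from rfl]
  rw [PySem.List.pyRange_of_pos _ _ (by norm_num : (0:Int) < 510)]
  rw [length_paddedOf]
  have hcnt : (if (0 : Int) < ((510 * nBlocks ids.length : Nat) : Int)
      then ((((510 * nBlocks ids.length : Nat) : Int) - 0 + 510 - 1) / 510).toNat else 0) = nBlocks ids.length := by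
    split_ifs with h
    · push_cast at h ⊢; omega
    · push_cast at h; omega
  rw [hcnt, List.map_map]
  apply List.map_congr_left
  intro k hk
  simp only [Function.comp, blkOf]
  congr 1
  rw [show (0 : Int) + 510 * (k : Int) = ((510 * k : Nat) : Int) by push_cast; ring]
  congr 1
  rw [show ((510 * k : Nat) : Int) + 510 = ((510 * k + 510 : Nat) : Int) by push_cast; ring]
  rw [PySem.List.slice_natCast]
  congr 1
  omega

-- the two block descriptions agree for every k < nBlocks
lemma blk_agree (ids : List Int) (k : Nat) (hk : k < nBlocks ids.length) :
    fBlkA ids (nBlocks ids.length : Int)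
      (if PySem.Int.mod (PySem.List.len ids) 510 = 0 then 510 else PySem.Int.mod (PySem.List.len ids) 510) k
    = blkOf ids k := by
  set n := ids.length with hn
  unfold fBlkA blkOf
  by_cases h : (k : Int) + 1 < (nBlocks n : Int)
  · -- interior block: 510*(k+1) ≤ n, so padding is invisible
    have hkk : 510 * (k + 1) < n := by
      have : k + 1 < nBlocks n := by exact_mod_cast h
      unfold nBlocks at this; omega
    rw [if_pos h]
    congr 1
    rw [show (510 : Int) * (k : Int) = ((510 * k : Nat) : Int) by push_cast; ring]
    rw [show ((510 * k : Nat) : Int) + 510 = ((510 * k + 510 : Nat) : Int) by push_cast; ring]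
    rw [PySem.List.slice_natCast]
    congr 1
    · unfold paddedOf
      rw [List.drop_append_of_le_length (by omega)]
      rw [List.take_append_of_le_length (by simp; omega)]
      congr 1
      omega
  · -- last block: k = nBlocks n - 1 and 1 ≤ n - 510*k ≤ 510
    have hk' : k + 1 = nBlocks n := by
      have : ¬ (k + 1 < nBlocks n) := by intro hc; exact h (by exact_mod_cast hc)
      omega
    have hlo : 510 * k < n := by unfold nBlocks at hk'; omega
    have hhi : n ≤ 510 * k + 510 := by unfold nBlocks at hk'; omega
    have hne : ids ≠ [] := by
      intro hc; rw [hc] at hn; simp at hn; omega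
    rw [if_neg h]
    have hdrop_ne : ids.drop (510 * k) ≠ [] := by
      intro hc
      have := congrArg List.length hc
      simp at this; omega
    -- lastBlockLen = n - 510*k  (as an Int)
    have hlbl : (if PySem.Int.mod (PySem.List.len ids) 510 = 0 then 510 else PySem.Int.mod (PySem.List.len ids) 510)
        = ((n - 510 * k : Nat) : Int) := by
      simp only [PySem.List.len_eq, ← hn]
      rw [PySem.Int.mod_eq_emod_of_pos (by norm_num)]
      split_ifs with h0
      · unfold nBlocks at hk'; omega
      · unfold nBlocks at hk'; omega
    rw [hlbl]
    -- the slice xs[510k:-1]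
    have hslice : PySem.List.slice ids (some (510 * (k : Int))) (some (-1))
        = (ids.drop (510 * k)).take (n - 510 * k - 1) := by
      rw [show (510 : Int) * (k : Int) = ((510 * k : Nat) : Int) by push_cast; ring]
      simp [PySem.List.slice, ← hn]
      rw [Nat.min_eq_left (by omega)]
      congr 1
      omega
    rw [hslice, PySem.List.pyGetD_neg_one ids 0 hne]
    -- right side: drop past ids is fully inside ids ++ padding, total length exactly 510
    unfold paddedOf
    rw [List.drop_append_of_le_length (by omega)]
    have hlen : ((ids.drop (510 * k)) ++ List.replicate (510 * nBlocks n - n) 0).length = 510 := by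
      simp; omega
    rw [List.take_of_length_le (le_of_eq hlen)]
    have hlast : ids.getLast hne = (ids.drop (510 * k)).getLast hdrop_ne := by
      rw [List.getLast_drop]
    have htake : (ids.drop (510 * k)).take (n - 510 * k - 1) ++ [ids.getLast hne] = ids.drop (510 * k) := by
      rw [hlast]
      have : n - 510 * k - 1 = (ids.drop (510 * k)).length - 1 := by simp; omega
      rw [this]
      exact List.take_append_getLast _ hdrop_ne
    have hrep : ((510 : Int) - ((n - 510 * k : Nat) : Int)).toNat = 510 * nBlocks n - n := by
      rw [← hk']; omega
    rw [hrep]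
    calc [101] ++ (ids.drop (510 * k)).take (n - 510 * k - 1) ++ [ids.getLast hne]
          ++ List.replicate (510 * nBlocks n - n) 0 ++ [102]
        = [101] ++ ((ids.drop (510 * k)).take (n - 510 * k - 1) ++ [ids.getLast hne])
          ++ List.replicate (510 * nBlocks n - n) 0 ++ [102] := by simp
      _ = [101] ++ (ids.drop (510 * k) ++ List.replicate (510 * nBlocks n - n) 0) ++ [102] := by
          rw [htake]; simp

-- ===== VERDICT (by name: the statement is the Claim_ definition above) =====
theorem separatorID_spec : Claim_equal_separatorID := by
  intro input_ids _
  unfold Spec_separatorID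
  rw [A_eq_map, B_eq_map]
  exact List.map_congr_left (fun k hk => blk_agree input_ids k (List.mem_range.mp hk))
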